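-- pv_equiv track=rewrite | github.com/nelfin/dns-parser-nom | utils.py | to_qname
-- ===== SOURCE A (Python) =====
-- def to_qname(domain):
--     parts = domain.split('.')
--     retval = []
--     for word in parts:
--         retval.append(len(word))
--         retval.extend(ord(c) for c in word)
--     retval.append(0)
--     return retval
-- ===== SOURCE B (Python) =====
-- def to_qname(domain):
--     res = []
--     seg = []
--     for c in domain:
--         if c == '.':
--             res.append(len(seg))
--             res.extend(seg)
--             seg = []
--         else:
--             seg.append(ord(c))
--     res.append(len(seg))
--     res.extend(seg)
--     res.append(0)
--     return res
-- ===== Notes on version B (the rewrite author's own statement) =====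
-- stated objective: alternative
-- what changed: Replaced the split-on-dots call plus a nested per-word loop with a single character-level state machine that keeps the current segment's ordinals and flushes length plus segment at each dot and at the end.
import Mathlib
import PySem

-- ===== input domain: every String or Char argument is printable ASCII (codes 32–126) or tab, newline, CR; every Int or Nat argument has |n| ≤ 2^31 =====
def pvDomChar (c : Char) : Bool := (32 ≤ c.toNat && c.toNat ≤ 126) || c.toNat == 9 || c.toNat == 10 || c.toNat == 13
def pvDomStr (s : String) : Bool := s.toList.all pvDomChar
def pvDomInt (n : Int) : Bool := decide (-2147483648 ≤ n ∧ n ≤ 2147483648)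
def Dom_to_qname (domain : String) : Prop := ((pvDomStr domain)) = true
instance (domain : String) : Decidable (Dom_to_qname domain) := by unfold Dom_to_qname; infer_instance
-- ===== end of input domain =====

-- B replaces split('.') + nested per-word loop by one character-level state machine; same cost, different decomposition.

-- ===== PORT A =====
def to_qname (domain : String) : List Int :=
  let parts := PySem.Chars.splitOn domain.toList ['.']
  let retval := parts.foldl
    (fun r w => (r ++ [(w.length : Int)]) ++ w.map (fun c => (c.toNat : Int))) []
  retval ++ [0]

-- ===== PORT B =====
def to_qname_alt (domain : String) : List Int :=
  let st := domain.toList.foldl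
    (fun (st : List Int × List Int) c =>
      if c = '.' then (st.1 ++ [(st.2.length : Int)] ++ st.2, ([] : List Int))
      else (st.1, st.2 ++ [(c.toNat : Int)])) ([], [])
  st.1 ++ [(st.2.length : Int)] ++ st.2 ++ [0]

-- ===== PRECONDITION & SPEC =====
def Spec_to_qname (domain : String) (out : List Int) : Prop := out = to_qname_alt domain
instance (domain : String) (out : List Int) : Decidable (Spec_to_qname domain out) := by unfold Spec_to_qname; infer_instance

-- ===== CLAIM (what is proved, stated in full; the proofs are below) =====
def Claim_equal_to_qname : Prop := ∀ (domain : String), Dom_to_qname domain → Spec_to_qname domain (to_qname domain)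

-- ===== LEMMAS AND PROOFS =====

-- the word encoder: length then the code points
def qEnc (w : List Char) : List Int := (w.length : Int) :: w.map (fun c => (c.toNat : Int))

-- B's loop body
def qStep (st : List Int × List Int) (c : Char) : List Int × List Int :=
  if c = '.' then (st.1 ++ [(st.2.length : Int)] ++ st.2, ([] : List Int))
  else (st.1, st.2 ++ [(c.toNat : Int)])

-- the res component of B's fold only grows by appending
theorem qStep_res_shift (l : List Char) (res seg : List Int) :
    l.foldl qStep (res, seg)
      = (res ++ (l.foldl qStep ([], seg)).1, (l.foldl qStep ([], seg)).2) := by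
  induction l generalizing res seg with
  | nil => simp
  | cons c rest ih =>
    simp only [List.foldl_cons]
    by_cases h : c = '.'
    · rw [show qStep (res, seg) c = (res ++ [(seg.length : Int)] ++ seg, []) by
        simp [qStep, h],
        show qStep (([] : List Int), seg) c = ([(seg.length : Int)] ++ seg, []) by
        simp [qStep, h]]
      rw [ih (res ++ [(seg.length : Int)] ++ seg) [], ih ([(seg.length : Int)] ++ seg) []]
      simp
    · rw [show qStep (res, seg) c = (res, seg ++ [(c.toNat : Int)]) by simp [qStep, h],
        show qStep (([] : List Int), seg) c = ([], seg ++ [(c.toNat : Int)]) by simp [qStep, h]]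
      exact ih res (seg ++ [(c.toNat : Int)])

-- B's flush of a final state
def qFlush (l : List Char) (seg : List Int) : List Int :=
  (l.foldl qStep ([], seg)).1
    ++ [(((l.foldl qStep ([], seg)).2).length : Int)] ++ (l.foldl qStep ([], seg)).2

-- main invariant: the segments produced by splitOn.go, encoded, equal B's state machine
theorem qGo_flatMap (fuel : Nat) (l cur : List Char) (acc : List (List Char))
    (hfuel : l.length ≤ fuel) :
    (PySem.Chars.splitOn.go ['.'] fuel l cur acc).flatMap qEnc
      = acc.reverse.flatMap qEnc ++ qFlush l (cur.reverse.map (fun c => (c.toNat : Int))) := by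
  induction fuel generalizing l cur acc with
  | zero =>
    have : l = [] := by cases l <;> simp_all
    subst this
    simp [PySem.Chars.splitOn.go, qFlush, qEnc]
  | succ fuel ih =>
    cases l with
    | nil => simp [PySem.Chars.splitOn.go, qFlush, qEnc]
    | cons c rest =>
      simp only [PySem.Chars.splitOn.go]
      by_cases h : c = '.'
      · subst h
        rw [if_pos (by simp)]
        simp only [List.length_cons] at hfuel
        rw [show List.drop (List.length ['.']) ('.' :: rest) = rest by simp]
        rw [ih rest [] (cur.reverse :: acc) (by omega)]
        have hB : qFlush ('.' :: rest) (cur.reverse.map (fun c => (c.toNat : Int)))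
            = qEnc cur.reverse ++ qFlush rest [] := by
          simp only [qFlush, List.foldl_cons]
          rw [show qStep (([] : List Int), cur.reverse.map (fun c => (c.toNat : Int))) '.'
              = ([(cur.reverse.length : Int)] ++ cur.reverse.map (fun c => (c.toNat : Int)), []) by
            simp [qStep]]
          rw [qStep_res_shift rest
            ([(cur.reverse.length : Int)] ++ cur.reverse.map (fun c => (c.toNat : Int))) []]
          simp [qEnc]
        rw [hB]
        simp
      · rw [if_neg (by simpa using fun hc => h hc.symm)]
        simp only [List.length_cons] at hfuel
        rw [ih rest (c :: cur) acc (by omega)]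
        have hB : qFlush (c :: rest) (cur.reverse.map (fun c => (c.toNat : Int)))
            = qFlush rest ((c :: cur).reverse.map (fun c => (c.toNat : Int))) := by
          simp only [qFlush, List.foldl_cons]
          rw [show qStep (([] : List Int), cur.reverse.map (fun c => (c.toNat : Int))) c
              = ([], cur.reverse.map (fun c => (c.toNat : Int)) ++ [(c.toNat : Int)]) by
            simp [qStep, h]]
          simp
        rw [hB]

-- ===== VERDICT (by name: the statement is the Claim_ definition above) =====
theorem to_qname_spec : Claim_equal_to_qname := by
  intro domain _
  unfold Spec_to_qname to_qname to_qname_alt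
  dsimp only
  have hstep : (fun (st : List Int × List Int) c =>
      if c = '.' then (st.1 ++ [(st.2.length : Int)] ++ st.2, ([] : List Int))
      else (st.1, st.2 ++ [(c.toNat : Int)])) = qStep := rfl
  have hA : List.foldl
      (fun r w => (r ++ [(w.length : Int)]) ++ w.map (fun c => (c.toNat : Int))) []
      (PySem.Chars.splitOn domain.toList ['.'])
      = (PySem.Chars.splitOn domain.toList ['.']).flatMap qEnc := by
    rw [show (fun r (w : List Char) => (r ++ [(w.length : Int)]) ++ w.map (fun c => (c.toNat : Int)))
        = (fun r w => r ++ qEnc w) from funext₂ fun r w => by simp [qEnc]]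
    exact PySem.List.foldl_append_eq_flatMap _ _ _
  have hG := qGo_flatMap (domain.toList.length + 1) domain.toList [] [] (by omega)
  rw [hstep, hA, PySem.Chars.splitOn, hG]
  simp [qFlush]
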